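-- pv_equiv track=rewrite | github.com/Ruthvikbr/python-coding | OA/robinhood/1.py | findStudentPairs
-- ===== SOURCE A (Python) =====
-- from itertools import combinations
-- from collections import defaultdict
--
-- def findStudentPairs(enrollments):
--     studentSet = set()
--     studentDirectory = defaultdict(list)
--     for i in enrollments:
--         studentSet.add(i[0])
--         studentDirectory[i[1]].append(i[0])
--
--     p = combinations(studentSet, 2)
--     output = defaultdict(list)
--     for i, v in p:
--         for courses in studentDirectory:
--             if i in studentDirectory[courses] and v in studentDirectory[courses]:
--                 output[(i, v)].append(courses)
--             elif (i, v) not in output: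
--                 output[(i, v)] = []
--
--     return output
-- ===== SOURCE B (Python) =====
-- from itertools import combinations
-- from collections import defaultdict
--
-- def findStudentPairs(enrollments):
--     # Course-major regrouping: the student set is built once (same insertion
--     # sequence as the original, so pair keys are oriented identically), every
--     # pair is pre-seeded with [], and then each course is appended once to each
--     # pair of its deduplicated students; the per-pair membership scans over
--     # every course list disappear.
--     studentSet = {row[0] for row in enrollments}
--     studentDirectory = defaultdict(list)
--     for row in enrollments:
--         studentDirectory[row[1]].append(row[0])
--
--     rank = {s: i for i, s in enumerate(studentSet)}
--     output = defaultdict(list)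
--     for pair in combinations(studentSet, 2):
--         output[pair] = []
--     for course, students in studentDirectory.items():
--         for a, b in combinations(dict.fromkeys(students), 2):
--             if rank[a] > rank[b]:
--                 a, b = b, a
--             output[(a, b)].append(course)
--     return output
-- ===== Notes on version B (the rewrite author's own statement) =====
-- stated objective: faster
-- what changed: Instead of scanning every course's full enrollment list for every student pair (membership tests inside a pair x course double loop), B builds the student set by comprehension and the directory in a separate loop, seeds every pair once, then iterates course-major, appending each course to the pairs of its deduplicated students (oriented by a precomputed rank map so keys match A's), eliminating the inner linear membership scans.
import Mathlib
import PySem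

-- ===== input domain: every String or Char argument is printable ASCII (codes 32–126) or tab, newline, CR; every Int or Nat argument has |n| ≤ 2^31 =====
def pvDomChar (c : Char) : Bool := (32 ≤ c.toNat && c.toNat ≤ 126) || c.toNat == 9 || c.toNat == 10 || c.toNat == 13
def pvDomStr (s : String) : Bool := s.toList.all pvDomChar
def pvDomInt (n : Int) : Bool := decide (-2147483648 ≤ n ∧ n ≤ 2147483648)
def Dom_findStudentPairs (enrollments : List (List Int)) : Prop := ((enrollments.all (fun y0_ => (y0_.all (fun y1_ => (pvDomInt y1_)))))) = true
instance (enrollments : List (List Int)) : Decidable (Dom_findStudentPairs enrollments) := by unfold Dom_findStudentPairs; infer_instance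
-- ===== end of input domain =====

-- B re-groups the output course-major (every pair seeded once, each course appended to the
-- pairs of its deduplicated students), removing A's per-pair linear membership scans over
-- every course list; equivalence is proved for the RETURN value.
--
-- Both Pythons iterate the same 'studentSet' object, and its CPython hash-table iteration
-- order determines the orientation of the tuple keys, so each port carries an exact model
-- of CPython's int-set insertion (hash, linear probes, perturbation, growth at
-- fill*5 >= mask*3) — A's below, B's own rendering in its section — sharing only
-- pvHash/pvSetEmpty; the lemma section proves the two renderings pointwise equal.

-- ===== CPython-set model, A's rendering =====

-- hash(n) for |n| ≤ 2^31 (hash(-1) = -2)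
def pvHash (n : Int) : Int := if n = -1 then -2 else n

-- the set's elements in table order (= Python's iteration order)
def pvKeys (t : Array (Option Int)) : List Int := t.toList.filterMap id

-- first empty slot among t[i..i+probes] (CPython's LINEAR_PROBES scan)
def pvScan (t : Array (Option Int)) : Nat → Nat → Option Nat
  | i, 0 => if t[i]? = some none then some i else none
  | i, p + 1 => if t[i]? = some none then some i else pvScan t (i + 1) p

-- CPython's probe sequence: linear block, then i = i*5 + 1 + (perturb >>= 5); fuel only for totality
def pvProbe (t : Array (Option Int)) : Nat → Nat → Nat → Option Nat
  | _, _, 0 => none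
  | i, perturb, fuel + 1 =>
    match pvScan t i (if i + 9 ≤ t.size - 1 then 9 else 0) with
    | some j => some j
    | none =>
      pvProbe t ((i * 5 + 1 + (perturb >>> 5)) % t.size) (perturb >>> 5) fuel

-- write an absent key into the slot CPython's probe finds (the push branch is the fuel
-- guard only — at CPython's load factors the probe always finds an empty slot)
def pvCleanInsert (t : Array (Option Int)) (key : Int) : Array (Option Int) :=
  let h := pvHash key
  match pvProbe t (h.emod (t.size : Int)).toNat (h.emod (2 ^ 64 : Int)).toNat (t.size + 64) with
  | some j => t.setIfInBounds j (some key)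
  | none => t.push (some key)

-- newsize = 8; while newsize <= minused: newsize <<= 1
def pvGrow : Nat → Nat → Nat → Nat
  | size, _, 0 => size
  | size, minused, f + 1 => if size ≤ minused then pvGrow (2 * size) minused f else size

-- set_table_resize: re-insert all entries, in old table order, into a blank larger table
def pvResize (t : Array (Option Int)) (minused : Nat) : Array (Option Int) :=
  t.foldl (fun nt e => match e with | some k => pvCleanInsert nt k | none => nt)
    (Array.replicate (pvGrow 8 minused (minused + 4)) none)

-- s.add(key): no-op on a present key (CPython detects presence along the same probe
-- sequence), else insert and grow when fill*5 >= mask*3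
def pvSetAdd (s : Array (Option Int) × Nat) (key : Int) : Array (Option Int) × Nat :=
  if key ∈ pvKeys s.1 then s
  else
    let t := pvCleanInsert s.1 key
    let u := s.2 + 1
    if 3 * (s.1.size - 1) ≤ 5 * u then
      (pvResize t (if 50000 < u then u * 2 else u * 4), u)
    else (t, u)

def pvSetEmpty : Array (Option Int) × Nat := (Array.replicate 8 none, 0)

-- ===== PORT A =====

-- itertools.combinations(xs, 2) as A consumes it: head paired with each later element, recurse
def pvCombos2 : List Int → List (Int × Int)
  | [] => []
  | x :: xs => xs.map (fun y => (x, y)) ++ pvCombos2 xs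

def findStudentPairs (enrollments : List (List Int)) : List (Int × Int × List Int) :=
  -- one combined loop: studentSet.add(i[0]); studentDirectory[i[1]].append(i[0])
  let sd :=
    enrollments.foldl
      (fun sd i =>
        (pvSetAdd sd.1 (PySem.List.pyGetD i 0 0),
         sd.2.modify (PySem.List.pyGetD i 1 0) [] (· ++ [PySem.List.pyGetD i 0 0])))
      (pvSetEmpty, (PySem.Dict.empty : PySem.Dict Int (List Int)))
  let p := pvCombos2 (pvKeys sd.1.1)
  let output : PySem.Dict (Int × Int) (List Int) :=
    p.foldl (fun output iv =>
      sd.2.keys.foldl (fun output courses =>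
        if iv.1 ∈ sd.2.getD courses [] ∧ iv.2 ∈ sd.2.getD courses [] then
          output.insert iv (output.getD iv [] ++ [courses])
        else if output.contains iv then output
        else output.insert iv [])
        output) PySem.Dict.empty
  output.items.map (fun kv => (kv.1.1, kv.1.2, kv.2))

-- ===== PORT B =====
-- B'st own rendering of the same CPython set model (different decomposition: probe loop as a
-- findSome? over a range, flipped guards, foldr element listing, structural recursion for the
-- build); proved pointwise equal to A'st rendering in the lemma section below.

-- find the slot for a fresh hd0: linear block scanned by findSome?, then perturbed rehash
def altSlot (tbl : Array (Option Int)) : Nat → Nat → Nat → Option Nat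
  | 0, _, _ => none
  | fl + 1, ix, pert =>
    match (List.range (if ix + 9 ≤ tbl.size - 1 then 10 else 1)).findSome?
        (fun dd => if tbl[ix + dd]? = some none then some (ix + dd) else none) with
    | some slot => some slot
    | none => altSlot tbl fl ((ix * 5 + 1 + (pert >>> 5)) % tbl.size) (pert >>> 5)

def altPut (tbl : Array (Option Int)) (el : Int) : Array (Option Int) :=
  match altSlot tbl (tbl.size + 64) ((pvHash el).emod (tbl.size : Int)).toNat ((pvHash el).emod (2 ^ 64 : Int)).toNat with
  | some slot => tbl.setIfInBounds slot (some el)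
  | none => tbl.push (some el)

def altGrow (need : Nat) : Nat → Nat → Nat
  | cur, 0 => cur
  | cur, fl + 1 => if need < cur then cur else altGrow need (2 * cur) fl

def altRebuild (tbl : Array (Option Int)) (need : Nat) : Array (Option Int) :=
  tbl.toList.foldl (fun acc2 ent => ent.elim acc2 (fun el => altPut acc2 el))
    (Array.replicate (altGrow need 8 (need + 4)) none)

-- the set'st elements in table order
def altElems (tbl : Array (Option Int)) : List Int :=
  tbl.foldr (fun ent tail => ent.elim tail (fun el => el :: tail)) []

def altAdd (st : Array (Option Int) × Nat) (hd0 : Int) : Array (Option Int) × Nat :=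
  if (altElems st.1).contains hd0 then st
  else
    let tbl := altPut st.1 hd0
    let used := st.2 + 1
    if 5 * used < 3 * (st.1.size - 1) then (tbl, used)
    else (altRebuild tbl (if 50000 < used then used * 2 else used * 4), used)

-- the set comprehension, as structural recursion over the drawn elements
def altSetOf : List Int → (Array (Option Int) × Nat) → Array (Option Int) × Nat
  | [], st => st
  | hd0 :: restl, st => altSetOf restl (altAdd st hd0)

-- itertools.combinations(restl, 2) as B consumes it: over the suffixes of restl
def altPairs (src : List Int) : List (Int × Int) :=
  src.tails.flatMap (fun tbl => match tbl with | [] => [] | hd0 :: restl => restl.map (fun y => (hd0, y)))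

def findStudentPairs_alt (enrollments : List (List Int)) : List (Int × Int × List Int) :=
  -- studentSet = {row[0] for row in enrollments}
  let studentSet :=
    altElems (altSetOf (enrollments.map (fun row => PySem.List.pyGetD row 0 0)) pvSetEmpty).1
  -- separate loop: studentDirectory[row[1]].append(row[0])
  let dir : PySem.Dict Int (List Int) :=
    enrollments.foldl
      (fun dd row => dd.modify (PySem.List.pyGetD row 1 0) [] (· ++ [PySem.List.pyGetD row 0 0]))
      PySem.Dict.empty
  -- rank = {st: ix for ix, st in enumerate(studentSet)}
  let rank : PySem.Dict Int Int :=
    studentSet.zipIdx.foldl (fun dd si => dd.insert si.1 (si.2 : Int)) PySem.Dict.empty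
  -- seed every pair with []
  let out0 : PySem.Dict (Int × Int) (List Int) :=
    (altPairs studentSet).foldl (fun dd pr => dd.insert pr []) PySem.Dict.empty
  -- course-major: append each course to the pairs of its deduplicated students
  let out :=
    dir.items.foldl (fun out cl =>
      (altPairs (PySem.List.dedup cl.2)).foldl (fun out ab =>
        let hd0 := if rank.getD ab.2 0 < rank.getD ab.1 0 then (ab.2, ab.1) else (ab.1, ab.2)
        out.insert hd0 (out.getD hd0 [] ++ [cl.1]))
        out) out0
  out.items.map (fun itm => (itm.1.1, itm.1.2, itm.2))

-- ===== PRECONDITION & SPEC =====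
-- Pre_ excludes exactly the rows shorter than two entries, on which A raises IndexError at i[0]/i[1].
def Pre_findStudentPairs (enrollments : List (List Int)) : Prop :=
  ∀ row ∈ enrollments, 2 ≤ row.length
instance (enrollments : List (List Int)) : Decidable (Pre_findStudentPairs enrollments) := by
  unfold Pre_findStudentPairs; infer_instance

def pvWitness_findStudentPairs : List (List Int) := [[1, 2], [3, 2]]

def Spec_findStudentPairs (enrollments : List (List Int)) (out : List (Int × Int × List Int)) : Prop := out = findStudentPairs_alt enrollments
instance (enrollments : List (List Int)) (out : List (Int × Int × List Int)) : Decidable (Spec_findStudentPairs enrollments out) := by unfold Spec_findStudentPairs; infer_instance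

-- ===== CLAIM (what is proved, stated in full; the proofs are below) =====
def Claim_equal_findStudentPairs : Prop := ∀ (enrollments : List (List Int)), Dom_findStudentPairs enrollments → Pre_findStudentPairs enrollments → Spec_findStudentPairs enrollments (findStudentPairs enrollments)

-- ===== LEMMAS AND PROOFS =====

-- B's suffix-wise pair enumeration is A's recursive one
theorem altPairs_eq (zs : List Int) : altPairs zs = pvCombos2 zs := by
  induction zs with
  | nil => rfl
  | cons x xs ih =>
    unfold altPairs at *
    rw [List.tails_cons, List.flatMap_cons, ih]
    rfl

-- B's set-model rendering agrees pointwise with A's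
theorem range_findSome?_eq_pvScan (t : Array (Option Int)) :
    ∀ (p i : Nat),
      (List.range (p + 1)).findSome? (fun d => if t[i + d]? = some none then some (i + d) else none)
        = pvScan t i p := by
  intro p
  induction p with
  | zero => intro i; simp [pvScan]
  | succ p ih =>
    intro i
    rw [List.range_succ_eq_map, List.findSome?_cons, List.findSome?_map]
    unfold pvScan
    by_cases h : t[i + 0]? = some none
    · simp only [h, if_pos rfl]
      simp at h
      simp [h]
    · simp only [h, if_neg]
      have harg : (fun d => (fun d => if t[i + d]? = some none then some (i + d) else none) (Nat.succ d))
          = (fun d => if t[(i + 1) + d]? = some none then some ((i + 1) + d) else none) := by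
        funext d
        have : i + (d + 1) = (i + 1) + d := by omega
        simp [Nat.succ_eq_add_one, this]
      rw [Function.comp_def, harg, ih (i + 1)]
      simp at h
      simp [h]

theorem altSlot_eq (t : Array (Option Int)) :
    ∀ (f i q : Nat), altSlot t f i q = pvProbe t i q f := by
  intro f
  induction f with
  | zero => intro i q; rfl
  | succ f ih =>
    intro i q
    unfold altSlot pvProbe
    by_cases h : i + 9 ≤ t.size - 1
    · rw [if_pos h, if_pos h, show (10 : Nat) = 9 + 1 from rfl, range_findSome?_eq_pvScan t 9 i]
      cases pvScan t i 9 <;> simp [ih]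
    · rw [if_neg h, if_neg h, show (1 : Nat) = 0 + 1 from rfl, range_findSome?_eq_pvScan t 0 i]
      cases pvScan t i 0 <;> simp [ih]

theorem altPut_eq (t : Array (Option Int)) (k : Int) : altPut t k = pvCleanInsert t k := by
  unfold altPut pvCleanInsert
  rw [altSlot_eq]

theorem altGrow_eq (m : Nat) : ∀ (f sz : Nat), altGrow m sz f = pvGrow sz m f := by
  intro f
  induction f with
  | zero => intro sz; rfl
  | succ f ih =>
    intro sz
    unfold altGrow pvGrow
    by_cases h : sz ≤ m
    · rw [if_neg (by omega), if_pos h, ih]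
    · rw [if_pos (by omega), if_neg h]

theorem altRebuild_eq (t : Array (Option Int)) (m : Nat) : altRebuild t m = pvResize t m := by
  unfold altRebuild pvResize
  rw [← Array.foldl_toList, altGrow_eq]
  congr 1
  funext nt e
  cases e <;> simp [altPut_eq]

theorem altElems_eq (t : Array (Option Int)) : altElems t = pvKeys t := by
  unfold altElems pvKeys
  rw [← Array.foldr_toList]
  induction t.toList with
  | nil => rfl
  | cons e l ih => cases e <;> simp [ih]

theorem altAdd_eq (s : Array (Option Int) × Nat) (k : Int) : altAdd s k = pvSetAdd s k := by
  unfold altAdd pvSetAdd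
  rw [altElems_eq]
  by_cases h : k ∈ pvKeys s.1
  · rw [if_pos (by simpa using h), if_pos h]
  · rw [if_neg (by simpa using h), if_neg h]
    simp only [altPut_eq, altRebuild_eq]
    by_cases hg : 3 * (s.1.size - 1) ≤ 5 * (s.2 + 1)
    · rw [if_neg (by omega), if_pos hg]
    · rw [if_pos (by omega), if_neg hg]

theorem altSetOf_eq : ∀ (xs : List Int) (s : Array (Option Int) × Nat),
    altSetOf xs s = xs.foldl pvSetAdd s := by
  intro xs
  induction xs with
  | nil => intro s; rfl
  | cons x xs ih => intro s; unfold altSetOf; rw [ih, altAdd_eq]; rfl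

theorem pvScan_spec (t : Array (Option Int)) :
    ∀ p i j, pvScan t i p = some j → t[j]? = some none := by
  intro p
  induction p with
  | zero => intro i j h; unfold pvScan at h; split at h <;> simp_all
  | succ p ih =>
    intro i j h; unfold pvScan at h; split at h
    · simp_all
    · exact ih _ _ h

theorem pvProbe_spec (t : Array (Option Int)) :
    ∀ f i q j, pvProbe t i q f = some j → t[j]? = some none := by
  intro f
  induction f with
  | zero => intro i q j h; simp [pvProbe] at h
  | succ f ih =>
    intro i q j h
    unfold pvProbe at h
    cases hs : pvScan t i (if i + 9 ≤ t.size - 1 then 9 else 0) with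
    | some j' => rw [hs] at h; cases h; exact pvScan_spec t _ _ _ hs
    | none => rw [hs] at h; exact ih _ _ _ h

theorem filterMap_set_none {l : List (Option Int)} {j : Nat} {k : Int}
    (h : l[j]? = some none) :
    ((l.set j (some k)).filterMap id).Perm (k :: l.filterMap id) := by
  induction l generalizing j with
  | nil => simp at h
  | cons x xs ih =>
    cases j with
    | zero =>
      simp at h; subst h; simp
    | succ j =>
      simp at h
      have := ih h
      cases x with
      | none => simpa using this
      | some v =>
        simp only [List.set_cons_succ, List.filterMap_cons]
        simp only [id] at *
        exact (this.cons v).trans (List.Perm.swap _ _ _)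

theorem keys_cleanInsert (t : Array (Option Int)) (k : Int) :
    (pvKeys (pvCleanInsert t k)).Perm (k :: pvKeys t) := by
  unfold pvCleanInsert
  cases hp : pvProbe t ((pvHash k).emod (t.size : Int)).toNat ((pvHash k).emod (2 ^ 64 : Int)).toNat (t.size + 64) with
  | some j =>
    simp only [hp]
    have hj := pvProbe_spec t _ _ _ _ hp
    unfold pvKeys
    rw [Array.toList_setIfInBounds]
    exact filterMap_set_none (by rw [Array.getElem?_toList]; exact hj)
  | none =>
    simp only [hp]
    unfold pvKeys
    rw [Array.toList_push, List.filterMap_append]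
    simp only [List.filterMap_cons, List.filterMap_nil, id]
    exact List.perm_append_singleton _ _

theorem keys_resize (t : Array (Option Int)) (m : Nat) :
    (pvKeys (pvResize t m)).Perm (pvKeys t) := by
  have gen : ∀ (es : List (Option Int)) (acc : Array (Option Int)),
      (pvKeys (es.foldl (fun nt e => match e with | some k => pvCleanInsert nt k | none => nt) acc)).Perm
        (pvKeys acc ++ es.filterMap id) := by
    intro es
    induction es with
    | nil => intro acc; simp
    | cons e es ih =>
      intro acc
      cases e with
      | none => simpa using ih acc
      | some k =>
        simp only [List.foldl_cons, List.filterMap_cons, id]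
        refine (ih _).trans ?_
        refine ((keys_cleanInsert acc k).append_right _).trans ?_
        exact (List.perm_middle).symm
  unfold pvResize
  rw [← Array.foldl_toList]
  refine (gen t.toList _).trans ?_
  simp [pvKeys]

theorem mem_keys_setAdd (s : Array (Option Int) × Nat) (k x : Int) :
    x ∈ pvKeys (pvSetAdd s k).1 ↔ x = k ∨ x ∈ pvKeys s.1 := by
  unfold pvSetAdd
  by_cases hk : k ∈ pvKeys s.1
  · simp only [hk, if_true]
    constructor
    · exact fun h => Or.inr h
    · rintro (rfl | h) <;> assumption
  · simp only [hk, if_false]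
    split
    · rw [(keys_resize _ _).mem_iff, (keys_cleanInsert _ _).mem_iff, List.mem_cons]
    · rw [(keys_cleanInsert _ _).mem_iff, List.mem_cons]

theorem nodup_keys_setAdd (s : Array (Option Int) × Nat) (k : Int)
    (h : (pvKeys s.1).Nodup) : (pvKeys (pvSetAdd s k).1).Nodup := by
  unfold pvSetAdd
  by_cases hk : k ∈ pvKeys s.1
  · simpa [hk]
  · simp only [hk, if_false]
    have hci : (pvKeys (pvCleanInsert s.1 k)).Nodup :=
      (keys_cleanInsert s.1 k).nodup_iff.mpr (by simp [h, hk])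
    split
    · exact (keys_resize _ _).nodup_iff.mpr hci
    · exact hci

theorem pvSetFold_mem (l : List Int) :
    ∀ (s : Array (Option Int) × Nat) (x : Int),
      x ∈ pvKeys ((l.foldl pvSetAdd s).1) ↔ x ∈ pvKeys s.1 ∨ x ∈ l := by
  induction l with
  | nil => simp
  | cons a l ih =>
    intro s x
    simp only [List.foldl_cons, ih, mem_keys_setAdd, List.mem_cons]
    tauto

theorem pvSetFold_nodup (l : List Int) :
    ∀ (s : Array (Option Int) × Nat), (pvKeys s.1).Nodup →
      (pvKeys ((l.foldl pvSetAdd s).1)).Nodup := by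
  induction l with
  | nil => intro s h; simpa
  | cons a l ih =>
    intro s h
    exact ih _ (nodup_keys_setAdd s a h)

theorem pvKeys_empty : pvKeys pvSetEmpty.1 = [] := by decide

-- ===== combos2 =====

theorem mem_pvCombos2 {zs : List Int} (h : zs.Nodup) (a b : Int) :
    (a, b) ∈ pvCombos2 zs ↔ a ∈ zs ∧ b ∈ zs ∧ zs.idxOf a < zs.idxOf b := by
  induction zs with
  | nil => simp [pvCombos2]
  | cons x xs ih =>
    simp only [pvCombos2, List.mem_append, List.mem_map]
    have hnd : xs.Nodup := h.of_cons
    have hx : x ∉ xs := (List.nodup_cons.mp h).1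
    constructor
    · rintro (⟨y, hy, hxy⟩ | hmem)
      · injection hxy with h1 h2
        subst h1; subst h2
        refine ⟨List.mem_cons_self, List.mem_cons_of_mem _ hy, ?_⟩
        have hne : x ≠ y := fun hxe => hx (hxe ▸ hy)
        simp [List.idxOf_cons, hne, beq_iff_eq]
      · obtain ⟨ha, hb, hlt⟩ := (ih hnd).mp hmem
        have hax : x ≠ a := fun he => hx (he ▸ ha)
        have hbx : x ≠ b := fun he => hx (he ▸ hb)
        refine ⟨List.mem_cons_of_mem _ ha, List.mem_cons_of_mem _ hb, ?_⟩
        simp [List.idxOf_cons, hax, hbx, beq_iff_eq]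
        omega
    · rintro ⟨ha, hb, hlt⟩
      rcases List.mem_cons.mp ha with rfl | ha'
      · -- a = x : b must be in xs
        rcases List.mem_cons.mp hb with rfl | hb'
        · simp at hlt
        · exact Or.inl ⟨b, hb', rfl⟩
      · have hax : x ≠ a := fun he => hx (he ▸ ha')
        rcases List.mem_cons.mp hb with rfl | hb'
        · exfalso
          simp [List.idxOf_cons, hax, beq_iff_eq] at hlt
        · have hbx : x ≠ b := fun he => hx (he ▸ hb')
          refine Or.inr ((ih hnd).mpr ⟨ha', hb', ?_⟩)
          simp [List.idxOf_cons, hax, hbx, beq_iff_eq] at hlt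
          omega

theorem fst_mem_of_mem_pvCombos2 {zs : List Int} {p : Int × Int} (h : p ∈ pvCombos2 zs) :
    p.1 ∈ zs ∧ p.2 ∈ zs := by
  induction zs with
  | nil => simp [pvCombos2] at h
  | cons x xs ih =>
    simp only [pvCombos2, List.mem_append, List.mem_map] at h
    rcases h with ⟨y, hy, rfl⟩ | h
    · exact ⟨List.mem_cons_self, List.mem_cons_of_mem _ hy⟩
    · obtain ⟨h1, h2⟩ := ih h
      exact ⟨List.mem_cons_of_mem _ h1, List.mem_cons_of_mem _ h2⟩

theorem nodup_pvCombos2 {zs : List Int} (h : zs.Nodup) : (pvCombos2 zs).Nodup := by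
  induction zs with
  | nil => simp [pvCombos2]
  | cons x xs ih =>
    have hx : x ∉ xs := (List.nodup_cons.mp h).1
    have hnd : xs.Nodup := h.of_cons
    simp only [pvCombos2]
    refine List.Nodup.append ?_ (ih hnd) ?_
    · exact hnd.map (fun a b hab => (Prod.mk.injEq _ _ _ _).mp hab |>.2)
    · intro p hp hq
      obtain ⟨y, hy, rfl⟩ := List.mem_map.mp hp
      exact hx (fst_mem_of_mem_pvCombos2 hq).1

-- ===== rank dict =====

theorem rank_get_of_not_mem (pairs : List (Int × Nat)) (d : PySem.Dict Int Int) (s : Int)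
    (h : s ∉ pairs.map Prod.fst) :
    (pairs.foldl (fun d si => d.insert si.1 (si.2 : Int)) d).get? s = d.get? s := by
  induction pairs generalizing d with
  | nil => rfl
  | cons p ps ih =>
    simp only [List.map_cons, List.mem_cons] at h
    push_neg at h
    simp only [List.foldl_cons]
    rw [ih _ h.2]
    exact PySem.Dict.get?_insert_of_ne _ _ h.1

theorem rank_getD_gen (S : List Int) :
    ∀ (n : Nat) (d : PySem.Dict Int Int) (s : Int), S.Nodup → s ∈ S →
      ((S.zipIdx n).foldl (fun d si => d.insert si.1 (si.2 : Int)) d).get? s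
        = some ((n + S.idxOf s : Nat) : Int) := by
  induction S with
  | nil => intro n d s _ hs; simp at hs
  | cons x xs ih =>
    intro n d s hnd hs
    simp only [List.zipIdx_cons, List.foldl_cons]
    by_cases hsx : s = x
    · subst hsx
      have hnx : s ∉ xs := (List.nodup_cons.mp hnd).1
      rw [rank_get_of_not_mem _ _ _ (by rw [List.zipIdx_map_fst]; exact hnx)]
      rw [PySem.Dict.get?_insert_self]
      simp
    · have hs' : s ∈ xs := by
        rcases List.mem_cons.mp hs with h | h
        · exact absurd h hsx
        · exact h
      rw [ih (n + 1) _ s (List.Nodup.of_cons hnd) hs']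
      have : (x :: xs).idxOf s = xs.idxOf s + 1 := by
        simp [List.idxOf_cons, Ne.symm hsx]
      rw [this]
      congr 1
      omega

def pvRankOf (S : List Int) : PySem.Dict Int Int :=
  S.zipIdx.foldl (fun d si => d.insert si.1 (si.2 : Int)) PySem.Dict.empty

theorem rank_getD (S : List Int) (hnd : S.Nodup) (s : Int) (hs : s ∈ S) :
    (pvRankOf S).getD s 0 = (S.idxOf s : Int) := by
  unfold pvRankOf
  rw [PySem.Dict.getD_eq_get?_getD, rank_getD_gen S 0 _ s hnd hs]
  simp

-- ===== named forms of the two output loops (proof-only; defeq to the ports' lambdas) =====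

def pvPred (dir : PySem.Dict Int (List Int)) (p : Int × Int) (c : Int) : Bool :=
  decide (p.1 ∈ dir.getD c [] ∧ p.2 ∈ dir.getD c [])

def pvStepA (dir : PySem.Dict Int (List Int)) (p : Int × Int)
    (out : PySem.Dict (Int × Int) (List Int)) (c : Int) : PySem.Dict (Int × Int) (List Int) :=
  if p.1 ∈ dir.getD c [] ∧ p.2 ∈ dir.getD c [] then out.insert p (out.getD p [] ++ [c])
  else if out.contains p then out else out.insert p []

def pvOrient (rank : PySem.Dict Int Int) (ab : Int × Int) : Int × Int :=
  if rank.getD ab.2 0 < rank.getD ab.1 0 then (ab.2, ab.1) else (ab.1, ab.2)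

def pvStepB (rank : PySem.Dict Int Int) (c : Int)
    (out : PySem.Dict (Int × Int) (List Int)) (ab : Int × Int) : PySem.Dict (Int × Int) (List Int) :=
  out.insert (pvOrient rank ab) (out.getD (pvOrient rank ab) [] ++ [c])

def pvPairs (e : List (List Int)) : List (Int × Int) :=
  e.map (fun r => (PySem.List.pyGetD r 1 0, PySem.List.pyGetD r 0 0))

def pvHeads (e : List (List Int)) : List Int := e.map (fun r => PySem.List.pyGetD r 0 0)

def pvDirOf (e : List (List Int)) : PySem.Dict Int (List Int) :=
  (pvPairs e).foldl (fun d p => d.modify p.1 [] (· ++ [p.2])) PySem.Dict.empty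

def pvSOf (e : List (List Int)) : List Int :=
  pvKeys (((pvHeads e).foldl pvSetAdd pvSetEmpty).1)

-- A's combined loop splits into the set fold and the directory fold
theorem build_split (e : List (List Int)) :
    e.foldl
      (fun sd i =>
        (pvSetAdd sd.1 (PySem.List.pyGetD i 0 0),
         sd.2.modify (PySem.List.pyGetD i 1 0) [] (· ++ [PySem.List.pyGetD i 0 0])))
      (pvSetEmpty, (PySem.Dict.empty : PySem.Dict Int (List Int)))
    = (((pvHeads e).foldl pvSetAdd pvSetEmpty), pvDirOf e) := by
  unfold pvDirOf pvPairs pvHeads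
  rw [PySem.List.foldl_prod_mk
    (f := fun (s : Array (Option Int) × Nat) (row : List Int) => pvSetAdd s (PySem.List.pyGetD row 0 0))
    (g := fun (d : PySem.Dict Int (List Int)) (row : List Int) =>
      d.modify (PySem.List.pyGetD row 1 0) [] (fun x => x ++ [PySem.List.pyGetD row 0 0]))]
  rw [List.foldl_map, List.foldl_map]

-- B's separate directory loop is the same dictionary
theorem dirOf_eq (e : List (List Int)) :
    pvDirOf e
      = e.foldl
          (fun d row => d.modify (PySem.List.pyGetD row 1 0) [] (· ++ [PySem.List.pyGetD row 0 0]))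
          PySem.Dict.empty := by
  unfold pvDirOf pvPairs
  rw [List.foldl_map]

-- ===== A-side: the nested loop computes pair ↦ filtered course list =====

theorem A_present (dir : PySem.Dict Int (List Int)) (p : Int × Int) :
    ∀ (cs : List Int) (out : PySem.Dict (Int × Int) (List Int)) (v : List Int),
      out.keys.Nodup → out.get? p = some v →
      (cs.foldl (pvStepA dir p) out).items
        = out.items.map (fun kv => if kv.1 == p then (p, v ++ cs.filter (pvPred dir p)) else kv) := by
  intro cs
  induction cs with
  | nil =>
    intro out v hnd hv
    simp only [List.foldl_nil, List.filter_nil, List.append_nil]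
    symm
    calc out.items.map (fun kv => if kv.1 == p then (p, v) else kv)
        = out.items.map (fun kv => kv) := by
          apply List.map_congr_left
          rintro ⟨kv1, kv2⟩ hkv
          by_cases hk : kv1 = p
          · subst hk
            have hg : out.get? kv1 = some kv2 := PySem.Dict.get?_of_mem_items _ hkv hnd
            rw [hv] at hg
            injection hg with hveq
            simp [hveq]
          · simp [hk]
      _ = out.items := List.map_id' out.items
  | cons c cs ih =>
    intro out v hnd hv
    have hcont : out.contains p = true := by
      rw [PySem.Dict.contains_eq_isSome_get?, hv]; rfl
    simp only [List.foldl_cons]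
    by_cases hp : p.1 ∈ dir.getD c [] ∧ p.2 ∈ dir.getD c []
    · have hstep : pvStepA dir p out c = out.insert p (v ++ [c]) := by
        unfold pvStepA
        rw [if_pos hp, PySem.Dict.getD_of_get?_eq_some _ _ hv]
      rw [hstep]
      have hnd' : (out.insert p (v ++ [c])).keys.Nodup := by
        rw [PySem.Dict.keys_insert_of_contains _ _ hcont]; exact hnd
      rw [ih _ (v ++ [c]) hnd' (PySem.Dict.get?_insert_self _ _ _)]
      rw [PySem.Dict.items_insert_of_contains _ _ hcont, List.map_map]
      apply List.map_congr_left
      intro kv _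
      by_cases hk : kv.1 = p
      · have hfilter : (c :: cs).filter (pvPred dir p) = c :: cs.filter (pvPred dir p) := by
          rw [List.filter_cons_of_pos (by simp [pvPred, hp])]
        simp [Function.comp, hk, hfilter]
      · simp [Function.comp, hk]
    · have hstep : pvStepA dir p out c = out := by
        unfold pvStepA
        rw [if_neg hp, if_pos hcont]
      rw [hstep, ih _ v hnd hv]
      have hfilter : (c :: cs).filter (pvPred dir p) = cs.filter (pvPred dir p) := by
        rw [List.filter_cons_of_neg (by simp [pvPred, hp])]
      rw [hfilter]

theorem A_fresh (dir : PySem.Dict Int (List Int)) (p : Int × Int)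
    (c : Int) (cs : List Int) (out : PySem.Dict (Int × Int) (List Int))
    (hnd : out.keys.Nodup) (hco : out.contains p = false) :
    ((c :: cs).foldl (pvStepA dir p) out).items
      = out.items ++ [(p, (c :: cs).filter (pvPred dir p))] := by
  have hget : out.getD p [] = [] := PySem.Dict.getD_of_not_contains _ _ hco
  have hpk : p ∉ out.keys := by
    intro h
    rw [(PySem.Dict.contains_iff_mem_keys _ _).mpr h] at hco
    cases hco
  simp only [List.foldl_cons]
  by_cases hp : p.1 ∈ dir.getD c [] ∧ p.2 ∈ dir.getD c []
  · have hstep : pvStepA dir p out c = out.insert p [c] := by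
      unfold pvStepA
      rw [if_pos hp, hget]
      rfl
    rw [hstep]
    have hitems : (out.insert p [c]).items = out.items ++ [(p, [c])] :=
      PySem.Dict.items_insert_of_not_contains _ _ hco
    have hnd' : (out.insert p [c]).keys.Nodup := by
      simp only [PySem.Dict.keys, hitems, List.map_append]
      simp only [PySem.Dict.keys] at hnd
      refine List.Nodup.append hnd (by simp) ?_
      intro q hq hq'
      simp at hq'
      subst hq'
      exact hpk hq
    rw [A_present dir p cs _ [c] hnd' (PySem.Dict.get?_insert_self _ _ _)]
    rw [hitems, List.map_append]
    have h1 : out.items.map (fun kv => if kv.1 == p then (p, [c] ++ cs.filter (pvPred dir p)) else kv) = out.items := by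
      calc out.items.map (fun kv => if kv.1 == p then (p, [c] ++ cs.filter (pvPred dir p)) else kv)
          = out.items.map (fun kv => kv) := by
            apply List.map_congr_left
            rintro ⟨kv1, kv2⟩ hkv
            have : kv1 ∈ out.keys := by
              simp only [PySem.Dict.keys]
              exact List.mem_map_of_mem hkv
            have hk : kv1 ≠ p := fun he => hpk (he ▸ this)
            simp [hk]
        _ = out.items := List.map_id' out.items
    rw [h1]
    have hfilter : (c :: cs).filter (pvPred dir p) = c :: cs.filter (pvPred dir p) := by
      rw [List.filter_cons_of_pos (by simp [pvPred, hp])]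
    simp [hfilter]
  · have hstep : pvStepA dir p out c = out.insert p [] := by
      unfold pvStepA
      rw [if_neg hp, if_neg (by simp [hco])]
    rw [hstep]
    have hitems : (out.insert p []).items = out.items ++ [(p, [])] :=
      PySem.Dict.items_insert_of_not_contains _ _ hco
    have hnd' : (out.insert p []).keys.Nodup := by
      simp only [PySem.Dict.keys, hitems, List.map_append]
      simp only [PySem.Dict.keys] at hnd
      refine List.Nodup.append hnd (by simp) ?_
      intro q hq hq'
      simp at hq'
      subst hq'
      exact hpk hq
    rw [A_present dir p cs _ [] hnd' (PySem.Dict.get?_insert_self _ _ _)]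
    rw [hitems, List.map_append]
    have h1 : out.items.map (fun kv => if kv.1 == p then (p, [] ++ cs.filter (pvPred dir p)) else kv) = out.items := by
      calc out.items.map (fun kv => if kv.1 == p then (p, [] ++ cs.filter (pvPred dir p)) else kv)
          = out.items.map (fun kv => kv) := by
            apply List.map_congr_left
            rintro ⟨kv1, kv2⟩ hkv
            have : kv1 ∈ out.keys := by
              simp only [PySem.Dict.keys]
              exact List.mem_map_of_mem hkv
            have hk : kv1 ≠ p := fun he => hpk (he ▸ this)
            simp [hk]
        _ = out.items := List.map_id' out.items
    rw [h1]
    have hfilter : (c :: cs).filter (pvPred dir p) = cs.filter (pvPred dir p) := by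
      rw [List.filter_cons_of_neg (by simp [pvPred, hp])]
    simp [hfilter]

theorem A_outer (dir : PySem.Dict Int (List Int)) (cs : List Int) (hcs : cs ≠ []) :
    ∀ (ps : List (Int × Int)) (out : PySem.Dict (Int × Int) (List Int)),
      ps.Nodup → out.keys.Nodup → (∀ p ∈ ps, out.contains p = false) →
      (ps.foldl (fun o p => cs.foldl (pvStepA dir p) o) out).items
        = out.items ++ ps.map (fun p => (p, cs.filter (pvPred dir p))) := by
  intro ps
  induction ps with
  | nil => intro out _ _ _; simp
  | cons p ps ih =>
    intro out hnd hknd hfresh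
    obtain ⟨c, cs', rfl⟩ : ∃ c cs', cs = c :: cs' := by
      cases cs with
      | nil => exact absurd rfl hcs
      | cons a b => exact ⟨a, b, rfl⟩
    have hpf : out.contains p = false := hfresh p List.mem_cons_self
    have key : ∀ (d' : PySem.Dict (Int × Int) (List Int)),
        d'.items = out.items ++ [(p, (c :: cs').filter (pvPred dir p))] →
        (ps.foldl (fun o q => List.foldl (pvStepA dir q) o (c :: cs')) d').items
          = out.items ++ (p :: ps).map (fun q => (q, (c :: cs').filter (pvPred dir q))) := by
      intro d' hd'
      have hkeys : d'.keys = out.keys ++ [p] := by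
        simp only [PySem.Dict.keys, hd', List.map_append]
        rfl
      have hknd' : d'.keys.Nodup := by
        rw [hkeys]
        refine List.Nodup.append hknd (by simp) ?_
        intro q hq hq'
        simp at hq'
        subst hq'
        rw [(PySem.Dict.contains_iff_mem_keys _ _).mpr hq] at hpf
        cases hpf
      have hfresh' : ∀ q ∈ ps, d'.contains q = false := by
        intro q hq
        have hqp : q ≠ p := by
          rintro rfl
          exact (List.nodup_cons.mp hnd).1 hq
        have hqo : q ∉ out.keys := by
          intro h
          have := hfresh q (List.mem_cons_of_mem _ hq)
          rw [(PySem.Dict.contains_iff_mem_keys _ _).mpr h] at this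
          cases this
        have hnm : q ∉ d'.keys := by
          rw [hkeys]
          simp [hqo, hqp]
        rw [← Bool.not_eq_true]
        intro h
        exact hnm ((PySem.Dict.contains_iff_mem_keys _ _).mp h)
      rw [ih d' (List.nodup_cons.mp hnd).2 hknd' hfresh', hd']
      simp
    exact key _ (A_fresh dir p c cs' out hknd hpf)

-- ===== B-side: seeded pairs, then course-major appends =====

theorem B_course (rank : PySem.Dict Int Int) (c : Int) (combos : List (Int × Int))
    (hcnd : combos.Nodup) :
    ∀ (PS : List (Int × Int)) (g : (Int × Int) → List Int)
      (out : PySem.Dict (Int × Int) (List Int)),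
      out.items = combos.map (fun p => (p, g p)) →
      (PS.map (pvOrient rank)).Nodup →
      (∀ ab ∈ PS, pvOrient rank ab ∈ combos) →
      (PS.foldl (pvStepB rank c) out).items
        = combos.map (fun p => (p, g p ++ if p ∈ PS.map (pvOrient rank) then [c] else [])) := by
  intro PS
  induction PS with
  | nil =>
    intro g out hout _ _
    simp only [List.foldl_nil, List.map_nil, List.not_mem_nil, if_false]
    rw [hout]
    simp
  | cons ab PS ih =>
    intro g out hout hnodup hsub
    have hknd : out.keys.Nodup := by
      simp only [PySem.Dict.keys, hout, List.map_map]
      have hc : ((fun (x : (Int × Int) × List Int) => x.1) ∘ fun p => (p, g p)) = fun (p : Int × Int) => p := rfl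
      rw [hc, List.map_id']
      exact hcnd
    set k0 := pvOrient rank ab with hk0
    have hk0mem : k0 ∈ combos := hsub ab List.mem_cons_self
    have hitem : (k0, g k0) ∈ out.items := by
      rw [hout]
      exact List.mem_map_of_mem hk0mem
    have hget : out.get? k0 = some (g k0) := PySem.Dict.get?_of_mem_items _ hitem hknd
    have hcont : out.contains k0 = true := by
      rw [PySem.Dict.contains_eq_isSome_get?, hget]; rfl
    have hstep : pvStepB rank c out ab = out.insert k0 (g k0 ++ [c]) := by
      unfold pvStepB
      rw [← hk0, PySem.Dict.getD_of_get?_eq_some _ _ hget]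
    have hitems' : (out.insert k0 (g k0 ++ [c])).items
        = combos.map (fun p => (p, if p = k0 then g p ++ [c] else g p)) := by
      rw [PySem.Dict.items_insert_of_contains _ _ hcont, hout, List.map_map]
      apply List.map_congr_left
      intro p _
      by_cases hp : p = k0
      · subst hp; simp
      · simp [Function.comp, hp]
    have hnodup' : (PS.map (pvOrient rank)).Nodup := (List.nodup_cons.mp (by simpa using hnodup)).2
    have hsub' : ∀ ab' ∈ PS, pvOrient rank ab' ∈ combos := fun ab' h => hsub ab' (List.mem_cons_of_mem _ h)
    have := ih (fun p => if p = k0 then g p ++ [c] else g p) (out.insert k0 (g k0 ++ [c])) hitems' hnodup' hsub'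
    simp only [List.foldl_cons]
    rw [show pvStepB rank c out ab = out.insert k0 (g k0 ++ [c]) from hstep, this]
    apply List.map_congr_left
    intro p hpmem
    have hhead : k0 ∉ PS.map (pvOrient rank) := by
      have hn : (pvOrient rank ab :: PS.map (pvOrient rank)).Nodup := by
        simpa using hnodup
      rw [← hk0] at hn
      exact (List.nodup_cons.mp hn).1
    simp only [List.map_cons, ← hk0, List.mem_cons]
    by_cases hp : p = k0
    · subst hp
      rw [if_pos rfl, if_neg hhead, if_pos (Or.inl rfl)]
      simp
    · rw [if_neg hp]
      by_cases hpin : p ∈ PS.map (pvOrient rank)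
      · rw [if_pos hpin, if_pos (Or.inr hpin)]
      · rw [if_neg hpin, if_neg (by rintro (h | h); exact hp h; exact hpin h)]

theorem idxOf_inj {l : List Int} (h : l.Nodup) {a b : Int} (ha : a ∈ l) (hb : b ∈ l)
    (hi : l.idxOf a = l.idxOf b) : a = b := by
  have h1 := List.getElem_idxOf (List.idxOf_lt_length_of_mem ha)
  have h2 := List.getElem_idxOf (List.idxOf_lt_length_of_mem hb)
  rw [← h1, ← h2]; congr 1

theorem orient_eq (S : List Int) (hnd : S.Nodup) (a b : Int) (ha : a ∈ S) (hb : b ∈ S) :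
    pvOrient (pvRankOf S) (a, b) = if S.idxOf b < S.idxOf a then (b, a) else (a, b) := by
  unfold pvOrient
  rw [rank_getD S hnd a ha, rank_getD S hnd b hb]
  simp

theorem orient_mem_combos (S : List Int) (hnd : S.Nodup) {a b : Int}
    (ha : a ∈ S) (hb : b ∈ S) (hab : a ≠ b) :
    pvOrient (pvRankOf S) (a, b) ∈ pvCombos2 S := by
  rw [orient_eq S hnd a b ha hb]
  have hne : S.idxOf a ≠ S.idxOf b := fun h => hab (idxOf_inj hnd ha hb h)
  split
  · exact (mem_pvCombos2 hnd b a).mpr ⟨hb, ha, by omega⟩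
  · exact (mem_pvCombos2 hnd a b).mpr ⟨ha, hb, by omega⟩

theorem mem_pvCombos2' {zs : List Int} (h : zs.Nodup) {a b : Int}
    (hm : (a, b) ∈ pvCombos2 zs) :
    a ∈ zs ∧ b ∈ zs ∧ zs.idxOf a < zs.idxOf b ∧ a ≠ b := by
  obtain ⟨ha, hb, hlt⟩ := (mem_pvCombos2 h a b).mp hm
  refine ⟨ha, hb, hlt, ?_⟩
  rintro rfl
  omega

theorem orient_cases (r : PySem.Dict Int Int) (a b : Int) :
    pvOrient r (a, b) = (a, b) ∨ pvOrient r (a, b) = (b, a) := by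
  unfold pvOrient
  split
  · exact Or.inr rfl
  · exact Or.inl rfl

theorem B_orient_complete (S : List Int) (hnd : S.Nodup) (l : List Int)
    (hl : ∀ x ∈ l, x ∈ S) (p : Int × Int) (hp : p ∈ pvCombos2 S) :
    (p ∈ (pvCombos2 (PySem.List.dedup l)).map (pvOrient (pvRankOf S))) ↔
      (p.1 ∈ l ∧ p.2 ∈ l) := by
  obtain ⟨x, y⟩ := p
  obtain ⟨hx, hy, hxy, hne⟩ := mem_pvCombos2' hnd hp
  constructor
  · rintro hmem
    obtain ⟨⟨a, b⟩, hab, heq⟩ := List.mem_map.mp hmem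
    obtain ⟨ha, hb, _, hab'⟩ := mem_pvCombos2' (PySem.List.nodup_dedup l) hab
    rw [PySem.List.mem_dedup] at ha hb
    rcases orient_cases (pvRankOf S) a b with h | h <;> rw [h] at heq
    · injection heq with h1 h2; subst h1; subst h2; exact ⟨ha, hb⟩
    · injection heq with h1 h2; subst h1; subst h2; exact ⟨hb, ha⟩
  · rintro ⟨hxl, hyl⟩
    have hxd : x ∈ PySem.List.dedup l := (PySem.List.mem_dedup l x).mpr hxl
    have hyd : y ∈ PySem.List.dedup l := (PySem.List.mem_dedup l y).mpr hyl
    have hdd := PySem.List.nodup_dedup l (α := Int)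
    have hidne : (PySem.List.dedup l).idxOf x ≠ (PySem.List.dedup l).idxOf y :=
      fun h => hne (idxOf_inj hdd hxd hyd h)
    rcases Nat.lt_or_ge ((PySem.List.dedup l).idxOf x) ((PySem.List.dedup l).idxOf y) with hlt | hge
    · refine List.mem_map.mpr ⟨(x, y), (mem_pvCombos2 hdd x y).mpr ⟨hxd, hyd, hlt⟩, ?_⟩
      rw [orient_eq S hnd x y hx hy, if_neg (by omega)]
    · have hlt : (PySem.List.dedup l).idxOf y < (PySem.List.dedup l).idxOf x := by omega
      refine List.mem_map.mpr ⟨(y, x), (mem_pvCombos2 hdd y x).mpr ⟨hyd, hxd, hlt⟩, ?_⟩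
      rw [orient_eq S hnd y x hy hx, if_pos (by omega)]

theorem B_orient_nodup (S : List Int) (hnd : S.Nodup) (l : List Int)
    (hl : ∀ x ∈ l, x ∈ S) :
    ((pvCombos2 (PySem.List.dedup l)).map (pvOrient (pvRankOf S))).Nodup := by
  have hdd := PySem.List.nodup_dedup l (α := Int)
  refine List.Nodup.map_on ?_ (nodup_pvCombos2 hdd)
  rintro ⟨a, b⟩ hab ⟨c, d⟩ hcd heq
  obtain ⟨_, _, hab2, _⟩ := mem_pvCombos2' hdd hab
  obtain ⟨_, _, hcd2, _⟩ := mem_pvCombos2' hdd hcd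
  rcases orient_cases (pvRankOf S) a b with h1 | h1 <;>
    rcases orient_cases (pvRankOf S) c d with h2 | h2 <;>
      rw [h1, h2] at heq <;> injection heq with e1 e2
  · rw [e1, e2]
  · subst e1; subst e2; omega
  · subst e1; subst e2; omega
  · subst e1; subst e2; rfl

theorem B_orient_sub (S : List Int) (hnd : S.Nodup) (l : List Int)
    (hl : ∀ x ∈ l, x ∈ S) :
    ∀ ab ∈ pvCombos2 (PySem.List.dedup l), pvOrient (pvRankOf S) ab ∈ pvCombos2 S := by
  rintro ⟨a, b⟩ hab
  obtain ⟨ha, hb, _, hne⟩ := mem_pvCombos2' (PySem.List.nodup_dedup l) hab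
  rw [PySem.List.mem_dedup] at ha hb
  exact orient_mem_combos S hnd (hl a ha) (hl b hb) hne

theorem B_courses (S : List Int) (hnd : S.Nodup) (dir : PySem.Dict Int (List Int)) :
    ∀ (ts : List (Int × List Int)) (g : (Int × Int) → List Int)
      (out : PySem.Dict (Int × Int) (List Int)),
      (∀ cl ∈ ts, (∀ x ∈ cl.2, x ∈ S) ∧ dir.getD cl.1 [] = cl.2) →
      out.items = (pvCombos2 S).map (fun p => (p, g p)) →
      (ts.foldl (fun out cl => (pvCombos2 (PySem.List.dedup cl.2)).foldl (pvStepB (pvRankOf S) cl.1) out) out).items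
        = (pvCombos2 S).map (fun p => (p, g p ++ (ts.map (fun cl => cl.1)).filter (pvPred dir p))) := by
  intro ts
  induction ts with
  | nil =>
    intro g out _ hout
    simp only [List.foldl_nil, List.map_nil, List.filter_nil, List.append_nil]
    exact hout
  | cons cl ts ih =>
    intro g out hts hout
    obtain ⟨c, l⟩ := cl
    obtain ⟨hlS, hgetD⟩ := hts (c, l) List.mem_cons_self
    have hstep := B_course (pvRankOf S) c (pvCombos2 S) (nodup_pvCombos2 hnd)
      (pvCombos2 (PySem.List.dedup l)) g out hout
      (B_orient_nodup S hnd l hlS) (B_orient_sub S hnd l hlS)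
    have hstep' : ((pvCombos2 (PySem.List.dedup l)).foldl (pvStepB (pvRankOf S) c) out).items
        = (pvCombos2 S).map (fun p => (p, g p ++ if pvPred dir p c = true then [c] else [])) := by
      rw [hstep]
      apply List.map_congr_left
      intro p hp
      by_cases hc : p.1 ∈ l ∧ p.2 ∈ l
      · rw [if_pos ((B_orient_complete S hnd l hlS p hp).mpr hc),
          if_pos (by simp [pvPred, hgetD, hc.1, hc.2])]
      · rw [if_neg (fun hmem => hc ((B_orient_complete S hnd l hlS p hp).mp hmem)),
          if_neg (by simp [pvPred, hgetD]; intro h1 h2; exact hc ⟨h1, h2⟩)]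
    refine (ih (fun p => g p ++ if pvPred dir p c = true then [c] else []) _
        (fun cl h => hts cl (List.mem_cons_of_mem _ h)) hstep').trans ?_
    apply List.map_congr_left
    intro p _
    simp only [List.map_cons, List.filter_cons]
    by_cases hc : pvPred dir p c = true
    · rw [if_pos hc, if_pos hc]
      simp
    · rw [if_neg hc, if_neg hc]
      simp

-- ===== VERDICT (by name: the statement is the Claim_ definition above) =====
theorem findStudentPairs_spec : Claim_equal_findStudentPairs := by
  intro e _ _
  show findStudentPairs e = findStudentPairs_alt e
  cases e with
  | nil => rfl
  | cons r rest =>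
    have hA : findStudentPairs (r :: rest)
        = ((pvCombos2 (pvSOf (r :: rest))).foldl
            (fun o p => (pvDirOf (r :: rest)).keys.foldl (pvStepA (pvDirOf (r :: rest)) p) o)
            PySem.Dict.empty).items.map (fun kv => (kv.1.1, kv.1.2, kv.2)) := by
      unfold findStudentPairs
      rw [build_split]
      rfl
    have hB : findStudentPairs_alt (r :: rest)
        = (((pvDirOf (r :: rest)).items.foldl
            (fun out cl => (pvCombos2 (PySem.List.dedup cl.2)).foldl
              (pvStepB (pvRankOf (pvSOf (r :: rest))) cl.1) out)
            ((pvCombos2 (pvSOf (r :: rest))).foldl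
              (fun d pr => d.insert pr []) PySem.Dict.empty)).items).map
            (fun kv => (kv.1.1, kv.1.2, kv.2)) := by
      unfold findStudentPairs_alt
      simp only [altSetOf_eq, altElems_eq, altPairs_eq]
      rw [← dirOf_eq]
      rfl
    rw [hA, hB]
    congr 1
    have hS_nodup : (pvSOf (r :: rest)).Nodup := by
      apply pvSetFold_nodup
      rw [pvKeys_empty]
      exact List.nodup_nil
    have hS_mem : ∀ x, x ∈ pvSOf (r :: rest) ↔ x ∈ pvHeads (r :: rest) := by
      intro x
      unfold pvSOf
      rw [pvSetFold_mem, pvKeys_empty]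
      simp
    have hk_nodup : (pvDirOf (r :: rest)).keys.Nodup := by
      unfold pvDirOf
      exact PySem.Dict.nodup_keys_foldl_modify_key _ (fun (p : Int × Int) => p.1) []
        (fun (_ : PySem.Dict Int (List Int)) (p : Int × Int) (v : List Int) => v ++ [p.2]) _ (by simp)
    have hkeys : (pvDirOf (r :: rest)).keys
        = PySem.Set.ofList ((pvPairs (r :: rest)).map (fun p => p.1)) := by
      unfold pvDirOf
      rw [PySem.Dict.keys_foldl_modify_key _ (fun (p : Int × Int) => p.1) []
        (fun (_ : PySem.Dict Int (List Int)) (p : Int × Int) (v : List Int) => v ++ [p.2])]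
      rw [PySem.Dict.keys_empty, PySem.Set.update_nil_left]
    have hC_ne : (pvDirOf (r :: rest)).keys ≠ [] := by
      rw [hkeys]
      have : PySem.List.pyGetD r 1 0 ∈ (pvPairs (r :: rest)).map (fun p => p.1) := by
        simp [pvPairs]
      exact List.ne_nil_of_mem ((PySem.Set.mem_ofList _ _).mpr this)
    have hval : ∀ cl ∈ (pvDirOf (r :: rest)).items,
        (∀ x ∈ cl.2, x ∈ pvSOf (r :: rest)) ∧ (pvDirOf (r :: rest)).getD cl.1 [] = cl.2 := by
      rintro ⟨c, l⟩ hcl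
      have hget : (pvDirOf (r :: rest)).getD c [] = l :=
        PySem.Dict.getD_of_mem_items _ hcl hk_nodup []
      refine ⟨?_, hget⟩
      intro x hx
      have hchar : (pvDirOf (r :: rest)).getD c []
          = [] ++ ((pvPairs (r :: rest)).filter (fun p => p.1 == c)).map (fun p => p.2) := by
        unfold pvDirOf
        rw [PySem.Dict.getD_foldl_modify_append]
        rfl
      rw [hget] at hchar
      rw [hchar] at hx
      simp only [List.nil_append, List.mem_map] at hx
      obtain ⟨p, hpf, rfl⟩ := hx
      have hpmem : p ∈ pvPairs (r :: rest) := List.mem_of_mem_filter hpf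
      have : p.2 ∈ pvHeads (r :: rest) := by
        unfold pvPairs at hpmem
        obtain ⟨row, hrow, rfl⟩ := List.mem_map.mp hpmem
        exact List.mem_map_of_mem hrow
      exact (hS_mem p.2).mpr this
    rw [A_outer (pvDirOf (r :: rest)) (pvDirOf (r :: rest)).keys hC_ne
      (pvCombos2 (pvSOf (r :: rest))) PySem.Dict.empty
      (nodup_pvCombos2 hS_nodup) (by simp) (by intro p _; rfl)]
    have hout0 : ((pvCombos2 (pvSOf (r :: rest))).foldl
        (fun d pr => d.insert pr []) PySem.Dict.empty).items
        = (pvCombos2 (pvSOf (r :: rest))).map (fun p => (p, ([] : List Int))) := by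
      have := PySem.Dict.items_foldl_insert_fresh (pvCombos2 (pvSOf (r :: rest)))
        (fun (a : Int × Int) => a) (fun _ => ([] : List Int)) PySem.Dict.empty
        (by intro a _; rfl) (by simpa using nodup_pvCombos2 hS_nodup)
      simpa using this
    rw [B_courses (pvSOf (r :: rest)) hS_nodup (pvDirOf (r :: rest))
      (pvDirOf (r :: rest)).items (fun _ => ([] : List Int)) _ hval hout0]
    simp only [List.nil_append]
    apply List.map_congr_left
    intro p _
    rfl
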